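-- pv_equiv track=rewrite | github.com/nicolasBeucher/mamba-image | branches/blackMamba/src/python/packages/mamba/palette.py | tagOneColorPalette
-- ===== SOURCE A (Python) =====
-- def tagOneColorPalette(value, color):
--     """
--     Creates a palette that tags a specific 'value' inside an image with a given
--     'color', a tuple (red, green, blue), while the rest of the image stays in
--     greyscale.
--     """
--     pal = ()
--     if value<0 or value>255:
--         raise ValueError("value must be inside range [0,255] : %d" % (value))
--     for i in range(value):
--         pal = pal + (i,i,i)
--     pal = pal + tuple(color)
--     for i in range(value+1,256):
--         pal = pal + (i,i,i)
--     return pal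
-- ===== SOURCE B (Python) =====
-- def tagOneColorPalette(value, color):
--     """
--     Creates a palette that tags a specific 'value' inside an image with a given
--     'color', a tuple (red, green, blue), while the rest of the image stays in
--     greyscale.
--     """
--     if value < 0 or value > 255:
--         raise ValueError("value must be inside range [0,255] : %d" % (value))
--     pal = [x for i in range(256) for x in (i, i, i)]
--     pal[3*value:3*value+3] = list(color)
--     return tuple(pal)
-- ===== Notes on version B (the rewrite author's own statement) =====
-- stated objective: simpler
-- what changed: Replaces the three-phase tuple concatenation (loop before the slot, insert color, loop after) by one uniform flat build of the full greyscale palette followed by a single slice-assignment patch of the tagged slot.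
import Mathlib
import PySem

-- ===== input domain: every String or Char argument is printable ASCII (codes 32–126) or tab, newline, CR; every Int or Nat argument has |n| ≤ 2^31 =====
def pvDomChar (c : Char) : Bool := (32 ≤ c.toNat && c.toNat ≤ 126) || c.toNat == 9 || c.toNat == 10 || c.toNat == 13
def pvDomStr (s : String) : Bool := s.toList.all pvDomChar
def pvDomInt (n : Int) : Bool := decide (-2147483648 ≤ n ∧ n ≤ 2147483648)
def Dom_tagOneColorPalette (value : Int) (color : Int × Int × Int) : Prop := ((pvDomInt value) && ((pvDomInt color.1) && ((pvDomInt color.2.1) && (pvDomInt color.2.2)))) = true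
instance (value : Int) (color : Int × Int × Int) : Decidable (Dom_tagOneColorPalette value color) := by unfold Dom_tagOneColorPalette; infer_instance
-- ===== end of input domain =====

-- B replaces A's three-phase tuple concatenation (loop, insert color, loop) by one flat
-- greyscale build of all 256 entries followed by a single slice-assignment patch (simpler).

-- ===== PORT A =====
-- literal transliteration: pal starts empty, first loop appends (i,i,i) for i < value,
-- then the color tuple, then the second loop appends (i,i,i) for value+1 ≤ i < 256
def tagOneColorPalette (value : Int) (color : Int × Int × Int) : List Int :=
  let pal : List Int := []
  let pal := (PySem.List.pyRange 0 value 1).foldl (fun acc i => acc ++ [i, i, i]) pal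
  let pal := pal ++ [color.1, color.2.1, color.2.2]
  let pal := (PySem.List.pyRange (value + 1) 256 1).foldl (fun acc i => acc ++ [i, i, i]) pal
  pal

-- ===== PORT B =====
-- full greyscale palette built in one pass, then the tagged slot patched by slice assignment
-- pal[3*value:3*value+3] = list(color); exact here since Pre_ gives 0 ≤ 3*value ≤ 765
def tagOneColorPalette_alt (value : Int) (color : Int × Int × Int) : List Int :=
  let pal := (PySem.List.pyRange 0 256 1).flatMap (fun i => [i, i, i])
  pal.take (3 * value).toNat ++ [color.1, color.2.1, color.2.2] ++ pal.drop (3 * value + 3).toNat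

-- ===== PRECONDITION & SPEC =====
-- Pre_ excludes exactly the inputs where A raises ValueError (value outside [0,255])
def Pre_tagOneColorPalette (value : Int) (_color : Int × Int × Int) : Prop :=
  0 ≤ value ∧ value ≤ 255
instance (value : Int) (color : Int × Int × Int) : Decidable (Pre_tagOneColorPalette value color) := by unfold Pre_tagOneColorPalette; infer_instance
def pvWitness_tagOneColorPalette : Int × (Int × Int × Int) := (3, (255, 0, 128))

def Spec_tagOneColorPalette (value : Int) (color : Int × Int × Int) (out : List Int) : Prop := out = tagOneColorPalette_alt value color
instance (value : Int) (color : Int × Int × Int) (out : List Int) : Decidable (Spec_tagOneColorPalette value color out) := by unfold Spec_tagOneColorPalette; infer_instance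

-- ===== CLAIM (what is proved, stated in full; the proofs are below) =====
def Claim_equal_tagOneColorPalette : Prop := ∀ (value : Int) (color : Int × Int × Int), Dom_tagOneColorPalette value color → Pre_tagOneColorPalette value color → Spec_tagOneColorPalette value color (tagOneColorPalette value color)

-- ===== LEMMAS AND PROOFS =====

theorem flatMap_triple_length (xs : List Int) :
    (xs.flatMap (fun i => [i, i, i])).length = 3 * xs.length := by
  induction xs with
  | nil => simp
  | cons x xs ih => simp [List.flatMap_cons, ih]; omega

-- ===== VERDICT (by name: the statement is the Claim_ definition above) =====
theorem tagOneColorPalette_spec : Claim_equal_tagOneColorPalette := by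
  intro value color _ hpre
  obtain ⟨h0, h255⟩ := hpre
  show tagOneColorPalette value color = tagOneColorPalette_alt value color
  simp only [tagOneColorPalette, tagOneColorPalette_alt,
    PySem.List.foldl_append_eq_flatMap, List.nil_append]
  have hr : PySem.List.pyRange 0 256 1
      = PySem.List.pyRange 0 value 1 ++ (value :: PySem.List.pyRange (value + 1) 256 1) := by
    rw [PySem.List.pyRange_one_append 0 value 256 h0 (by omega),
        PySem.List.pyRange_one_cons (a := value) (b := 256) (by omega)]
  rw [hr, List.flatMap_append, List.flatMap_cons]
  set L := (PySem.List.pyRange 0 value 1).flatMap (fun i => [i, i, i]) with hLdef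
  set R := (PySem.List.pyRange (value + 1) 256 1).flatMap (fun i => [i, i, i]) with hRdef
  have hL : L.length = 3 * value.toNat := by
    rw [hLdef, flatMap_triple_length, PySem.List.length_pyRange_one]
    omega
  have htake : (L ++ ([value, value, value] ++ R)).take (3 * value).toNat = L := by
    rw [(by rw [hL]; omega : (3 * value).toNat = L.length)]
    exact List.take_left
  have hdrop : (L ++ ([value, value, value] ++ R)).drop (3 * value + 3).toNat = R := by
    rw [(by simp [hL]; omega : (3 * value + 3).toNat = (L ++ [value, value, value]).length),
        ← List.append_assoc]
    exact List.drop_left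
  rw [htake, hdrop]
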